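-- pv_equiv track=rewrite | github.com/Gibewevi/MagicClaw | magic_claw/cli.py | _combine_pasted_prompt
-- ===== SOURCE A (Python) =====
-- def _combine_pasted_prompt(first_line: str, extra_text: str) -> str:
--     text = first_line
--     if extra_text:
--         text = f"{first_line}\n{extra_text}"
--     lines = text.replace("\r\n", "\n").replace("\r", "\n").split("\n")
--     while lines and not lines[0].strip():
--         lines.pop(0)
--     while lines and not lines[-1].strip():
--         lines.pop()
--     return "\n".join(line.rstrip() for line in lines)
-- ===== SOURCE B (Python) =====
-- def _combine_pasted_prompt(first_line: str, extra_text: str) -> str: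
--     # Single forward pass: rstrip each line; skip blanks before the first content
--     # line; buffer interior blank runs and flush them only when more content follows,
--     # so trailing blanks are never emitted.
--     text = f"{first_line}\n{extra_text}" if extra_text else first_line
--     out = []
--     blanks = 0
--     for raw in text.replace("\r\n", "\n").replace("\r", "\n").split("\n"):
--         line = raw.rstrip()
--         if line == "":
--             if out:
--                 blanks += 1
--         else:
--             out.extend([""] * blanks)
--             blanks = 0
--             out.append(line)
--     return "\n".join(out)
-- ===== Notes on version B (the rewrite author's own statement) =====
-- stated objective: alternative
-- what changed: A's two destructive pop-while loops (front and back) plus an rstrip inside the final join are replaced by one forward pass with an (output, pending-blank-count) accumulator that skips leading blanks and never emits buffered blanks unless more content follows.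
import Mathlib
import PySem

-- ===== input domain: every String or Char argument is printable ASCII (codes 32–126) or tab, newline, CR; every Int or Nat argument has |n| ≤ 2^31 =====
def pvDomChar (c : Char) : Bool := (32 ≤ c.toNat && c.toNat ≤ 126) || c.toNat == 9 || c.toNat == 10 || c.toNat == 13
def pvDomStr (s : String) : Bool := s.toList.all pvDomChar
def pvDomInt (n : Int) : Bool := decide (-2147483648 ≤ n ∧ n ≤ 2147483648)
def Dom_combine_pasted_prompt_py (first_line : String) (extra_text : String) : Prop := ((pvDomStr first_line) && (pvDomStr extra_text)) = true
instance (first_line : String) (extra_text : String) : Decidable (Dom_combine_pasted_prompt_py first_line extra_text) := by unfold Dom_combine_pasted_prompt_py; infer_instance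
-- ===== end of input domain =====

-- B replaces A's two destructive pop-while loops + rstrip-inside-join by a single
-- forward pass with an (output, pending-blanks) accumulator (objective: alternative decomposition).

-- ===== PORT A =====
def combine_pasted_prompt_py (first_line : String) (extra_text : String) : String :=
  -- text = first_line; if extra_text: text = f"{first_line}\n{extra_text}"
  let text : List Char :=
    if extra_text.toList.isEmpty then first_line.toList
    else first_line.toList ++ '\n' :: extra_text.toList
  -- lines = text.replace("\r\n", "\n").replace("\r", "\n").split("\n")
  let lines := PySem.Chars.splitOn
    (PySem.Chars.replace (PySem.Chars.replace text ['\r', '\n'] ['\n']) ['\r'] ['\n']) ['\n']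
  -- while lines and not lines[0].strip(): lines.pop(0)
  let lines := lines.dropWhile (fun l => (PySem.Chars.strip l).isEmpty)
  -- while lines and not lines[-1].strip(): lines.pop()   (a pop-from-the-end loop = dropWhile over the reverse)
  let lines := (lines.reverse.dropWhile (fun l => (PySem.Chars.strip l).isEmpty)).reverse
  -- "\n".join(line.rstrip() for line in lines)
  String.mk (PySem.Chars.join ['\n'] (lines.map PySem.Chars.rstrip))

-- ===== PORT B =====
-- the body of Source B's for-loop: rstrip the raw line, then skip/buffer/flush
def pvStepB (acc : List (List Char) × Nat) (raw : List Char) : List (List Char) × Nat :=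
  let line := PySem.Chars.rstrip raw
  if line.isEmpty then
    if acc.1.isEmpty then acc else (acc.1, acc.2 + 1)
  else
    (acc.1 ++ List.replicate acc.2 [] ++ [line], 0)

def combine_pasted_prompt_py_alt (first_line : String) (extra_text : String) : String :=
  let text : List Char :=
    if extra_text.toList.isEmpty then first_line.toList
    else first_line.toList ++ '\n' :: extra_text.toList
  let res := (PySem.Chars.splitOn
    (PySem.Chars.replace (PySem.Chars.replace text ['\r', '\n'] ['\n']) ['\r'] ['\n'])
    ['\n']).foldl pvStepB ([], 0)
  String.mk (PySem.Chars.join ['\n'] res.1)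

-- ===== PRECONDITION & SPEC =====
def Spec_combine_pasted_prompt_py (first_line : String) (extra_text : String) (out : String) : Prop := out = combine_pasted_prompt_py_alt first_line extra_text
instance (first_line : String) (extra_text : String) (out : String) : Decidable (Spec_combine_pasted_prompt_py first_line extra_text out) := by unfold Spec_combine_pasted_prompt_py; infer_instance

-- ===== CLAIM (what is proved, stated in full; the proofs are below) =====
def Claim_equal_combine_pasted_prompt_py : Prop := ∀ (first_line : String) (extra_text : String), Dom_combine_pasted_prompt_py first_line extra_text → Spec_combine_pasted_prompt_py first_line extra_text (combine_pasted_prompt_py first_line extra_text)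

-- ===== LEMMAS AND PROOFS =====

-- pvStepB with the rstrip already performed
def pvFlush (acc : List (List Char) × Nat) (line : List Char) : List (List Char) × Nat :=
  if line.isEmpty then
    if acc.1.isEmpty then acc else (acc.1, acc.2 + 1)
  else
    (acc.1 ++ List.replicate acc.2 [] ++ [line], 0)

def pvRtrim (cs : List (List Char)) : List (List Char) :=
  (cs.reverse.dropWhile List.isEmpty).reverse

theorem pvAll_drop (p : Char → Bool) (l : List Char) :
    (∀ x ∈ l.dropWhile p, p x = true) ↔ (∀ x ∈ l, p x = true) := by
  induction l with
  | nil => simp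
  | cons a t ih =>
    by_cases h : p a = true
    · simp [h, ih]
    · simp [h]

theorem pvStripEmpty (l : List Char) :
    (PySem.Chars.strip l).isEmpty = (PySem.Chars.rstrip l).isEmpty := by
  rw [Bool.eq_iff_iff]
  simp [PySem.Chars.strip, PySem.Chars.rstrip, PySem.Chars.lstrip,
    List.isEmpty_iff, List.dropWhile_eq_nil_iff, List.mem_reverse, pvAll_drop]

theorem pvRtrim_cons (c : List Char) (cs : List (List Char)) :
    pvRtrim (c :: cs) =
      if pvRtrim cs = [] then (if c.isEmpty then [] else [c]) else c :: pvRtrim cs := by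
  simp only [pvRtrim, List.reverse_cons, List.dropWhile_append]
  by_cases h : (cs.reverse.dropWhile List.isEmpty) = []
  · by_cases hc : c.isEmpty <;> simp [h, hc]
  · simp [h, List.isEmpty_iff, List.reverse_eq_nil_iff]

theorem pvStarted (cs : List (List Char)) (out : List (List Char)) (blanks : Nat)
    (h : out ≠ []) :
    (cs.foldl pvFlush (out, blanks)).1 =
      out ++ (if pvRtrim cs = [] then [] else List.replicate blanks [] ++ pvRtrim cs) := by
  induction cs generalizing out blanks with
  | nil => simp [pvRtrim]
  | cons c cs ih =>
    have hout : out.isEmpty = false := by simpa [List.isEmpty_iff] using h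
    rw [List.foldl_cons, pvRtrim_cons]
    by_cases hc : c.isEmpty
    · have hc' : c = [] := by simpa [List.isEmpty_iff] using hc
      rw [show pvFlush (out, blanks) c = (out, blanks + 1) by simp [pvFlush, hc, hout]]
      rw [ih out (blanks + 1) h]
      by_cases hr : pvRtrim cs = [] <;>
        simp [hr, hc', List.replicate_succ']
    · rw [show pvFlush (out, blanks) c = (out ++ List.replicate blanks [] ++ [c], 0) by
        simp [pvFlush, hc]]
      rw [ih _ 0 (by simp)]
      by_cases hr : pvRtrim cs = [] <;> simp [hr, hc]

theorem pvStart (cs : List (List Char)) :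
    (cs.foldl pvFlush ([], 0)).1 = pvRtrim (cs.dropWhile List.isEmpty) := by
  induction cs with
  | nil => simp [pvRtrim]
  | cons c cs ih =>
    rw [List.foldl_cons]
    by_cases hc : c.isEmpty
    · rw [show pvFlush ([], 0) c = (([] : List (List Char)), 0) by simp [pvFlush, hc]]
      simpa [List.dropWhile_cons, hc] using ih
    · rw [show pvFlush ([], 0) c = ([c], 0) by simp [pvFlush, hc]]
      rw [pvStarted cs [c] 0 (by simp), List.dropWhile_cons_of_neg (by simp [hc]), pvRtrim_cons]
      by_cases hr : pvRtrim cs = [] <;> simp [hr, hc]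

theorem pvMain (ls : List (List Char)) :
    (((ls.dropWhile (fun l => (PySem.Chars.strip l).isEmpty)).reverse.dropWhile
        (fun l => (PySem.Chars.strip l).isEmpty)).reverse).map PySem.Chars.rstrip =
      (ls.foldl pvStepB ([], 0)).1 := by
  have hp : (fun l => (PySem.Chars.strip l).isEmpty) =
      (List.isEmpty ∘ PySem.Chars.rstrip) := funext pvStripEmpty
  have hfold : ls.foldl pvStepB ([], 0) = (ls.map PySem.Chars.rstrip).foldl pvFlush ([], 0) := by
    rw [List.foldl_map]; rfl
  rw [hfold, pvStart, hp, List.map_reverse, ← List.dropWhile_map, List.map_reverse,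
    ← List.dropWhile_map, pvRtrim]

-- ===== VERDICT (by name: the statement is the Claim_ definition above) =====
theorem combine_pasted_prompt_py_spec : Claim_equal_combine_pasted_prompt_py := by
  intro first_line extra_text _
  unfold Spec_combine_pasted_prompt_py combine_pasted_prompt_py combine_pasted_prompt_py_alt
  exact congrArg String.mk (congrArg (PySem.Chars.join ['\n']) (pvMain _))
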